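-- pv_equiv track=rewrite | github.com/FantinBibas/dateomatic | dateomatic.py | get_schema_transformations
-- ===== SOURCE A (Python) =====
-- import itertools
--
-- DayIdentifier = 'd'
--
-- MonthIdentifier = 'm'
--
-- YearIdentifier = 'y'
--
-- SeparatorIdentifier = 's'
--
-- def get_sized_transformations(number, paddings):
--     for padding in paddings:
--         yield str(number).zfill(padding)[-padding:]
--
-- def get_year_transformations(year):
--     yield from get_sized_transformations(year, [2, 4])
--
-- def get_month_transformations(month, months_dictionary):
--     yield from get_sized_transformations(month, [1, 2] if month < 10 else [2])
--     for transformation in months_dictionary[month]: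
--         yield transformation
--
-- def get_day_transformations(day):
--     yield from get_sized_transformations(day, [1, 2])
--
-- def get_transformation_from_identifier(identifier, day, month, year, months_dictionary, separator):
--     if identifier == DayIdentifier:
--         yield from get_day_transformations(day)
--     elif identifier == MonthIdentifier:
--         yield from get_month_transformations(month, months_dictionary)
--     elif identifier == YearIdentifier:
--         yield from get_year_transformations(year)
--     elif identifier == SeparatorIdentifier:
--         yield separator
--
-- def get_schema_transformations(schema, day, month, year, months_dictionary, separator):
--     if len(schema) == 0:
--         yield schema
--     else:
--         transformations = get_transformation_from_identifier(schema[0], day, month, year, months_dictionary, separator)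
--         if len(schema) == 1:
--             yield from transformations
--         else:
--             for prefix, suffix in itertools.product(transformations, get_schema_transformations(schema[1:], day, month, year, months_dictionary, separator)):
--                 yield prefix + suffix
-- ===== SOURCE B (Python) =====
-- def _clip(n, w):
--     return str(n).zfill(w)[-w:]
--
-- def _options(c, day, month, year, months_dictionary, separator):
--     if c == 'd':
--         return [_clip(day, 1), _clip(day, 2)]
--     if c == 'm':
--         sized = [_clip(month, 1), _clip(month, 2)] if month < 10 else [_clip(month, 2)]
--         return sized + list(months_dictionary[month])
--     if c == 'y':
--         return [_clip(year, 2), _clip(year, 4)]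
--     if c == 's':
--         return [separator]
--     return []
--
-- def get_schema_transformations(schema, day, month, year, months_dictionary, separator):
--     combos = ['']
--     for c in schema:
--         opts = _options(c, day, month, year, months_dictionary, separator)
--         combos = [prefix + x for prefix in combos for x in opts]
--     yield from combos
-- ===== Notes on version B (the rewrite author's own statement) =====
-- stated objective: simpler
-- what changed: Replaces A's generator recursion on the schema suffix (with a separate length-0/length-1 case and itertools.product per level) by one left fold: each position's option list is computed by a plain list-returning helper and extends a running list of combinations, no recursion and no itertools.
import Mathlib
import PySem

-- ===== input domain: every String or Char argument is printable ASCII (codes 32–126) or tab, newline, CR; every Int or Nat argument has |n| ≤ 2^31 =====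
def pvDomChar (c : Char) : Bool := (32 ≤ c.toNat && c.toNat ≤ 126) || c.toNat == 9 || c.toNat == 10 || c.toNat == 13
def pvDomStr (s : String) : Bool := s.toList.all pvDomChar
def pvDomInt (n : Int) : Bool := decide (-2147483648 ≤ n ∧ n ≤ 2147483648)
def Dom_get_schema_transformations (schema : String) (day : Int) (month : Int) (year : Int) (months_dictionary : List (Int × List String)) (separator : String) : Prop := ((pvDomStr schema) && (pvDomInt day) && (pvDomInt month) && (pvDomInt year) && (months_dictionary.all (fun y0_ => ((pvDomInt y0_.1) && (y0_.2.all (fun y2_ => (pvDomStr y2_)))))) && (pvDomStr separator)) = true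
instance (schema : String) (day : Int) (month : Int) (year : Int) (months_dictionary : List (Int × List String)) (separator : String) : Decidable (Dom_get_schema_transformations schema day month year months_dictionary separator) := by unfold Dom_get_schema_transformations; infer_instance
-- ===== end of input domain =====

-- B replaces A's suffix recursion with a single left fold that extends a list of
-- combinations one schema position at a time (objective: simpler decomposition, same cost).

-- ===== PORT A =====
-- str(number).zfill(padding)[-padding:] — shared primitive of both Pythons (A's
-- get_sized_transformations and B's _clip); exact via PySem.Str.zfill / Str.slice.
def pyClip (number : Int) (padding : Int) : String :=
  PySem.Str.slice (PySem.Str.zfill (PySem.Int.toStr number) padding) (some (-padding)) none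

-- dict lookup months_dictionary[month] (raises KeyError when absent — excluded by Pre_;
-- here the first matching entry, defaulting to [] outside Pre_)
def pyMonthsLookup (months_dictionary : List (Int × List String)) (month : Int) : List String :=
  ((months_dictionary.find? (fun p => p.1 == month)).map (·.2)).getD []

def pySizedTransformations (number : Int) (paddings : List Int) : List String :=
  paddings.map (fun padding => pyClip number padding)

def pyTransformationFromIdentifier (identifier : Char) (day : Int) (month : Int) (year : Int) (months_dictionary : List (Int × List String)) (separator : String) : List String :=
  if identifier = 'd' then
    pySizedTransformations day [1, 2]
  else if identifier = 'm' then
    pySizedTransformations month (if month < 10 then [1, 2] else [2]) ++ pyMonthsLookup months_dictionary month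
  else if identifier = 'y' then
    pySizedTransformations year [2, 4]
  else if identifier = 's' then
    [separator]
  else
    []

def pySchemaRec (cs : List Char) (day : Int) (month : Int) (year : Int) (months_dictionary : List (Int × List String)) (separator : String) : List String :=
  match cs with
  | [] => [""]    -- yields schema, which is "" here
  | [c] => pyTransformationFromIdentifier c day month year months_dictionary separator
  | c :: rest =>
      (pyTransformationFromIdentifier c day month year months_dictionary separator).flatMap
        (fun pre => (pySchemaRec rest day month year months_dictionary separator).map (fun suffix => pre ++ suffix))

def get_schema_transformations (schema : String) (day : Int) (month : Int) (year : Int) (months_dictionary : List (Int × List String)) (separator : String) : List String :=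
  pySchemaRec schema.toList day month year months_dictionary separator

-- ===== PORT B =====
def pyOptions (c : Char) (day : Int) (month : Int) (year : Int) (months_dictionary : List (Int × List String)) (separator : String) : List String :=
  if c = 'd' then
    [pyClip day 1, pyClip day 2]
  else if c = 'm' then
    (if month < 10 then [pyClip month 1, pyClip month 2] else [pyClip month 2]) ++ pyMonthsLookup months_dictionary month
  else if c = 'y' then
    [pyClip year 2, pyClip year 4]
  else if c = 's' then
    [separator]
  else
    []

def get_schema_transformations_alt (schema : String) (day : Int) (month : Int) (year : Int) (months_dictionary : List (Int × List String)) (separator : String) : List String :=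
  schema.toList.foldl
    (fun combos c =>
      combos.flatMap (fun pre => (pyOptions c day month year months_dictionary separator).map (fun x => pre ++ x)))
    [""]

-- ===== PRECONDITION & SPEC =====
-- Pre_ excludes exactly the inputs on which Python A raises KeyError: a schema containing
-- the month identifier 'm' while months_dictionary has no entry for month.
def Pre_get_schema_transformations (schema : String) (day : Int) (month : Int) (year : Int) (months_dictionary : List (Int × List String)) (separator : String) : Prop :=
  'm' ∈ schema.toList → months_dictionary.any (fun p => p.1 == month) = true
instance (schema : String) (day : Int) (month : Int) (year : Int) (months_dictionary : List (Int × List String)) (separator : String) : Decidable (Pre_get_schema_transformations schema day month year months_dictionary separator) := by unfold Pre_get_schema_transformations; infer_instance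

def pvWitness_get_schema_transformations : String × Int × Int × Int × (List (Int × List String)) × String :=
  ("d s m s y", 7, 3, 1999, [(3, ["mar", "march"])], "/")

def Spec_get_schema_transformations (schema : String) (day : Int) (month : Int) (year : Int) (months_dictionary : List (Int × List String)) (separator : String) (out : List String) : Prop := out = get_schema_transformations_alt schema day month year months_dictionary separator
instance (schema : String) (day : Int) (month : Int) (year : Int) (months_dictionary : List (Int × List String)) (separator : String) (out : List String) : Decidable (Spec_get_schema_transformations schema day month year months_dictionary separator out) := by unfold Spec_get_schema_transformations; infer_instance

-- ===== CLAIM (what is proved, stated in full; the proofs are below) =====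
def Claim_equal_get_schema_transformations : Prop := ∀ (schema : String) (day : Int) (month : Int) (year : Int) (months_dictionary : List (Int × List String)) (separator : String), Dom_get_schema_transformations schema day month year months_dictionary separator → Pre_get_schema_transformations schema day month year months_dictionary separator → Spec_get_schema_transformations schema day month year months_dictionary separator (get_schema_transformations schema day month year months_dictionary separator)

-- ===== LEMMAS AND PROOFS =====
theorem pvWitness_ok :
    Dom_get_schema_transformations (pvWitness_get_schema_transformations.1) (pvWitness_get_schema_transformations.2.1) (pvWitness_get_schema_transformations.2.2.1) (pvWitness_get_schema_transformations.2.2.2.1) (pvWitness_get_schema_transformations.2.2.2.2.1) (pvWitness_get_schema_transformations.2.2.2.2.2) ∧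
    Pre_get_schema_transformations (pvWitness_get_schema_transformations.1) (pvWitness_get_schema_transformations.2.1) (pvWitness_get_schema_transformations.2.2.1) (pvWitness_get_schema_transformations.2.2.2.1) (pvWitness_get_schema_transformations.2.2.2.2.1) (pvWitness_get_schema_transformations.2.2.2.2.2) := by
  constructor <;> decide

theorem options_eq (c : Char) (day month year : Int) (md : List (Int × List String)) (sep : String) :
    pyTransformationFromIdentifier c day month year md sep = pyOptions c day month year md sep := by
  unfold pyTransformationFromIdentifier pyOptions pySizedTransformations
  split_ifs <;> simp [List.map]

-- the fold step distributes over an arbitrary accumulator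
theorem foldl_step_dist (cs : List Char) (day month year : Int) (md : List (Int × List String)) (sep : String) :
    ∀ combos : List String,
      cs.foldl (fun combos c => combos.flatMap (fun p => (pyOptions c day month year md sep).map (fun x => p ++ x))) combos
        = combos.flatMap (fun p =>
            (cs.foldl (fun combos c => combos.flatMap (fun p => (pyOptions c day month year md sep).map (fun x => p ++ x))) [""]).map
              (fun s => p ++ s)) := by
  induction cs with
  | nil =>
      intro combos
      simp
  | cons c cs ih =>
      intro combos
      simp only [List.foldl_cons]
      rw [ih, ih ([""].flatMap (fun p => (pyOptions c day month year md sep).map (fun x => p ++ x)))]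
      simp [List.flatMap_assoc, List.map_flatMap, List.flatMap_map, List.map_map, Function.comp_def,
        String.append_assoc]

theorem fold_cons_eq (c : Char) (cs : List Char) (day month year : Int) (md : List (Int × List String)) (sep : String) :
    (c :: cs).foldl
        (fun combos c => combos.flatMap (fun p => (pyOptions c day month year md sep).map (fun x => p ++ x)))
        [""]
      = (pyOptions c day month year md sep).flatMap
          (fun p =>
            (cs.foldl (fun combos c => combos.flatMap (fun p => (pyOptions c day month year md sep).map (fun x => p ++ x))) [""]).map
              (fun s => p ++ s)) := by
  rw [List.foldl_cons, foldl_step_dist]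
  simp

theorem rec_eq_fold (cs : List Char) (day month year : Int) (md : List (Int × List String)) (sep : String) :
    pySchemaRec cs day month year md sep
      = cs.foldl
          (fun combos c => combos.flatMap (fun p => (pyOptions c day month year md sep).map (fun x => p ++ x)))
          [""] := by
  induction cs with
  | nil => rfl
  | cons c rest ih =>
      cases rest with
      | nil =>
          simp [pySchemaRec, options_eq]
      | cons c' rest' =>
          rw [show pySchemaRec (c :: c' :: rest') day month year md sep
              = (pyTransformationFromIdentifier c day month year md sep).flatMap
                  (fun pre => (pySchemaRec (c' :: rest') day month year md sep).map (fun suffix => pre ++ suffix)) from rfl,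
            options_eq, ih, fold_cons_eq, fold_cons_eq, fold_cons_eq]

-- ===== VERDICT (by name: the statement is the Claim_ definition above) =====
theorem get_schema_transformations_spec : Claim_equal_get_schema_transformations := by
  intro schema day month year md sep _ _
  unfold Spec_get_schema_transformations get_schema_transformations get_schema_transformations_alt
  exact rec_eq_fold schema.toList day month year md sep
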